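-- pv_equiv track=rewrite | github.com/Jagnate/GTA_graph_tensor_acclelrator_for_general_GNN | v3.7/compiler.py | is_subgraph_output_returning
-- ===== SOURCE A (Python) =====
-- def is_subgraph_output_returning(graph, subgraph_nodes):
--     """
--     判断子图的输出是否最终会回到子图
--     :param graph: 图的邻接表表示，字典形式 {节点: [相邻节点列表]}
--     :param subgraph_nodes: 子图的节点列表
--     :return: 如果子图的输出最终会回到子图返回 True，否则返回 False
--     """
--     subgraph_set = set(subgraph_nodes)
--
--     def dfs(node, visited):
--         if node in visited:
--             return False
--         if node in subgraph_set:
--             return True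
--
--         visited.add(node)
--         for neighbor in graph.get(node, []):
--             if dfs(neighbor, visited):
--                 return True
--         visited.remove(node)
--         return False
--
--     for node in subgraph_nodes:
--         visited = set()
--         for neighbor in graph.get(node, []):
--             if neighbor not in subgraph_set:
--                 if dfs(neighbor, visited):
--                     return True
--
--     return False
-- ===== SOURCE B (Python) =====
-- def is_subgraph_output_returning(graph, subgraph_nodes):
--     """
--     判断子图的输出是否最终会回到子图
--     Re-implementation: one reverse-edge BFS from the subgraph computes the set
--     of outside nodes that can reach it, instead of a backtracking DFS from
--     every start node.
--     """
--     sub = set(subgraph_nodes)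
--     rev = {}
--     for u, nbrs in graph.items():
--         for v in nbrs:
--             rev.setdefault(v, []).append(u)
--     # nodes outside the subgraph that can reach the subgraph, found by walking
--     # reverse edges starting from the subgraph nodes
--     reach = set()
--     stack = list(subgraph_nodes)
--     while stack:
--         x = stack.pop()
--         for p in rev.get(x, []):
--             if p not in sub and p not in reach:
--                 reach.add(p)
--                 stack.append(p)
--     return any(v not in sub and v in reach
--                for u in subgraph_nodes for v in graph.get(u, []))
-- ===== Notes on version B (the rewrite author's own statement) =====
-- stated objective: alternative
-- what changed: Replaced the per-start-node backtracking DFS that enumerates simple paths with a single reverse-edge BFS from the subgraph nodes that computes the set of outside nodes able to reach the subgraph.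
import Mathlib
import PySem

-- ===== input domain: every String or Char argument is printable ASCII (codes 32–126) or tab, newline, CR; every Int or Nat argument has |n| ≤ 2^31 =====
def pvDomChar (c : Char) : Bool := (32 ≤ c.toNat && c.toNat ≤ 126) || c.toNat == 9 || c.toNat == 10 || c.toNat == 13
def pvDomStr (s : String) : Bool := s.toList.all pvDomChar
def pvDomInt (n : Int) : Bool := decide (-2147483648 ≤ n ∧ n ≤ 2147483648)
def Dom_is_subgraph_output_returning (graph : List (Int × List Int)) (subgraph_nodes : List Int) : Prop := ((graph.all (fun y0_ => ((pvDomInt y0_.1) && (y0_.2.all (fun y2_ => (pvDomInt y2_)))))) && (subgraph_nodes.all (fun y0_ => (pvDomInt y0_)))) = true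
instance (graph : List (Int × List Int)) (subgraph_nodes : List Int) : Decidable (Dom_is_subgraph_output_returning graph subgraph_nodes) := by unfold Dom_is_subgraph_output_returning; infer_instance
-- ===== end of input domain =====

-- B replaces A's per-start backtracking DFS with a single reverse-edge BFS from the subgraph
-- nodes (objective: alternative algorithm). Python A mutates only its local `visited` set; no
-- argument of either program is mutated.

-- ===== PORT A =====
-- `graph.get(node, [])` (dict.get, first match)
def pvAdj (graph : List (Int × List Int)) (node : Int) : List Int :=
  PySem.Dict.getD ⟨graph⟩ node []

-- termination helper for the two recursions below (cited in their decreasing_by)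
theorem pv_filter_add_lt (C visited : List Int) (node : Int) (hk : node ∈ C)
    (hv : visited.contains node = false) :
    (C.filter (fun k => !List.contains (PySem.Set.add visited node) k)).length <
      (C.filter (fun k => !List.contains visited k)).length := by
  have hnv : node ∉ visited := by simpa using hv
  have hadd : PySem.Set.add visited node = visited ++ [node] := by
    simp [PySem.Set.add, PySem.Set.contains, hnv]
  rw [hadd]
  have hfe : C.filter (fun k => !List.contains (visited ++ [node]) k)
      = (C.filter (fun k => !List.contains visited k)).filter (fun k => !(k == node)) := by
    rw [List.filter_filter]
    apply List.filter_congr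
    intro a _
    cases h1 : visited.contains a <;> cases h2 : (a == node) <;> simp_all
  rw [hfe]
  apply List.length_filter_lt_length_iff_exists.mpr
  exact ⟨node, by simp [List.mem_filter, hk, hnv], by simp⟩

theorem pvAdj_ne_nil_mem (graph : List (Int × List Int)) (node : Int)
    (h : pvAdj graph node ≠ []) : node ∈ graph.map Prod.fst := by
  unfold pvAdj at h
  rw [PySem.Dict.getD_eq_get?_getD] at h
  cases hg : PySem.Dict.get? (⟨graph⟩ : PySem.Dict Int (List Int)) node with
  | none => rw [hg] at h; simp at h
  | some l =>
    have := (PySem.Dict.get?_eq_none_iff_not_mem_keys (⟨graph⟩ : PySem.Dict Int (List Int)) node)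
    have hmem : node ∈ (⟨graph⟩ : PySem.Dict Int (List Int)).keys := by
      by_contra hc
      rw [← this] at hc
      rw [hc] at hg; cases hg
    simpa [PySem.Dict.keys, PySem.Dict.items] using hmem

-- the inner `dfs(node, visited)`; Python's shared `visited` is restored exactly whenever dfs
-- returns False, so threading it functionally is result-equal
def pvDfs (graph : List (Int × List Int)) (sub : PySem.Set Int) (node : Int)
    (visited : PySem.Set Int) : Bool :=
  if hv : visited.contains node then false
  else if sub.contains node then true
  else
    (pvAdj graph node).attach.any (fun nb =>
      pvDfs graph sub nb.1 (PySem.Set.add visited node))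
termination_by ((graph.map Prod.fst).filter (fun k => !visited.contains k)).length
decreasing_by
  have hk : node ∈ graph.map Prod.fst :=
    pvAdj_ne_nil_mem graph node (List.ne_nil_of_mem nb.2)
  have := pv_filter_add_lt (graph.map Prod.fst) visited node hk (by simpa using hv)
  simpa [PySem.Set.contains] using this

def is_subgraph_output_returning (graph : List (Int × List Int)) (subgraph_nodes : List Int) : Bool :=
  let subgraph_set := PySem.Set.ofList subgraph_nodes
  subgraph_nodes.any (fun node =>
    (pvAdj graph node).any (fun neighbor =>
      !subgraph_set.contains neighbor &&
        pvDfs graph subgraph_set neighbor PySem.Set.empty))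

-- ===== PORT B =====
-- rev = {}; for u, nbrs in graph.items(): for v in nbrs: rev.setdefault(v, []).append(u)
def pvRev (graph : List (Int × List Int)) : PySem.Dict Int (List Int) :=
  graph.foldl (fun d p => p.2.foldl (fun d v => PySem.Dict.modify d v [] (· ++ [p.1])) d)
    PySem.Dict.empty

-- candidate pool for the BFS termination measure (every pushed node lies in it)
def pvCands (rev : PySem.Dict Int (List Int)) : List Int := rev.values.flatten

def pvMeasure (C : List Int) (acc : PySem.Set Int × List Int) : Nat :=
  (C.filter (fun k => !List.contains acc.1 k)).length + acc.2.length

-- the inner `for p in rev.get(x, []): …` loop body over the pair (reach, stack)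
def pvScan (sub : PySem.Set Int) (ps : List Int) (acc : PySem.Set Int × List Int) :
    PySem.Set Int × List Int :=
  ps.foldl (fun acc p =>
    if !sub.contains p && !PySem.Set.contains acc.1 p then (PySem.Set.add acc.1 p, p :: acc.2)
    else acc) acc

theorem pvScan_measure (sub : PySem.Set Int) (C ps : List Int) (acc : PySem.Set Int × List Int)
    (h : ∀ p ∈ ps, p ∈ C) : pvMeasure C (pvScan sub ps acc) ≤ pvMeasure C acc := by
  induction ps generalizing acc with
  | nil => simp [pvScan]
  | cons p ps ih =>
    have hp : p ∈ C := h p (by simp)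
    have h' : ∀ q ∈ ps, q ∈ C := fun q hq => h q (by simp [hq])
    simp only [pvScan, List.foldl_cons]
    split_ifs with hc
    · refine le_trans (ih _ h') ?_
      simp only [pvMeasure]
      have hcp : List.contains acc.1 p = false := by
        simp only [Bool.and_eq_true, Bool.not_eq_true'] at hc
        simpa [PySem.Set.contains] using hc.2
      have hlt := pv_filter_add_lt C acc.1 p hp hcp
      simp only [List.length_cons]
      omega
    · exact ih _ h'

theorem pv_getD_cands (rev : PySem.Dict Int (List Int)) (x p : Int)
    (hp : p ∈ rev.getD x []) : p ∈ pvCands rev := by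
  rw [PySem.Dict.getD_eq_get?_getD] at hp
  cases hg : rev.get? x with
  | none => rw [hg] at hp; simp at hp
  | some l =>
    rw [hg] at hp
    have hit := PySem.Dict.mem_items_of_get?_eq_some rev hg
    have hl : l ∈ rev.values := by
      simp only [PySem.Dict.values, List.mem_map]
      exact ⟨(x, l), hit, rfl⟩
    simp only [pvCands, List.mem_flatten]
    exact ⟨l, hl, hp⟩

-- the `while stack:` loop
def pvBfs (rev : PySem.Dict Int (List Int)) (sub : PySem.Set Int) :
    (stack : List Int) → (reach : PySem.Set Int) → PySem.Set Int
  | [], reach => reach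
  | x :: stack, reach =>
    let rs := pvScan sub (rev.getD x []) (reach, stack)
    pvBfs rev sub rs.2 rs.1
termination_by stack reach => pvMeasure (pvCands rev) (reach, stack)
decreasing_by
  have := pvScan_measure sub (pvCands rev) (rev.getD x []) (reach, stack)
    (fun p hp => pv_getD_cands rev x p hp)
  simp only [pvMeasure, List.length_cons] at this ⊢
  omega

def is_subgraph_output_returning_alt (graph : List (Int × List Int)) (subgraph_nodes : List Int) : Bool :=
  let sub := PySem.Set.ofList subgraph_nodes
  let rev := pvRev graph
  let reach := pvBfs rev sub subgraph_nodes PySem.Set.empty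
  subgraph_nodes.any (fun u =>
    (pvAdj graph u).any (fun v => !sub.contains v && PySem.Set.contains reach v))

-- ===== PRECONDITION & SPEC =====
-- Pre_ excludes association lists with duplicate keys: such inputs cannot arise from a Python
-- dict (graph is a dict in Python), and on them A's first-match `get` and B's reverse-index,
-- which sees every pair, can disagree.
def Pre_is_subgraph_output_returning (graph : List (Int × List Int)) (subgraph_nodes : List Int) : Prop :=
  (graph.map Prod.fst).Nodup
instance (graph : List (Int × List Int)) (subgraph_nodes : List Int) : Decidable (Pre_is_subgraph_output_returning graph subgraph_nodes) := by unfold Pre_is_subgraph_output_returning; infer_instance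

def pvWitness_is_subgraph_output_returning : (List (Int × List Int)) × List Int :=
  ([(0, [1]), (1, [2]), (2, [0])], [0])

def Spec_is_subgraph_output_returning (graph : List (Int × List Int)) (subgraph_nodes : List Int) (out : Bool) : Prop := out = is_subgraph_output_returning_alt graph subgraph_nodes
instance (graph : List (Int × List Int)) (subgraph_nodes : List Int) (out : Bool) : Decidable (Spec_is_subgraph_output_returning graph subgraph_nodes out) := by unfold Spec_is_subgraph_output_returning; infer_instance

-- ===== CLAIM (what is proved, stated in full; the proofs are below) =====
def Claim_equal_is_subgraph_output_returning : Prop := ∀ (graph : List (Int × List Int)) (subgraph_nodes : List Int), Dom_is_subgraph_output_returning graph subgraph_nodes → Pre_is_subgraph_output_returning graph subgraph_nodes → Spec_is_subgraph_output_returning graph subgraph_nodes (is_subgraph_output_returning graph subgraph_nodes)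

-- ===== LEMMAS AND PROOFS =====

-- `x can reach the subgraph along graph edges`
inductive pvReach (graph : List (Int × List Int)) (sub : PySem.Set Int) : Int → Prop
  | hit : ∀ x, sub.contains x = true → pvReach graph sub x
  | step : ∀ x y, y ∈ pvAdj graph x → pvReach graph sub y → pvReach graph sub x

-- what pvDfs explores: a path to the subgraph avoiding `V`, with backtracking state built in
inductive pvRS (graph : List (Int × List Int)) (sub : PySem.Set Int) : PySem.Set Int → Int → Prop
  | hit : ∀ V x, PySem.Set.contains V x = false → sub.contains x = true → pvRS graph sub V x
  | step : ∀ V x y, PySem.Set.contains V x = false → sub.contains x = false →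
      y ∈ pvAdj graph x → pvRS graph sub (PySem.Set.add V x) y → pvRS graph sub V x

-- explicit edge-path to the subgraph, stopping at its first subgraph node
def pvChain (graph : List (Int × List Int)) (sub : PySem.Set Int) : Int → List Int → Prop
  | x, [] => sub.contains x = true
  | x, y :: l => sub.contains x = false ∧ y ∈ pvAdj graph x ∧ pvChain graph sub y l

-- `p is found by the reverse BFS`: reverse-edge path from a subgraph node
inductive pvBack (rev : PySem.Dict Int (List Int)) (sub : PySem.Set Int) : Int → Prop
  | root : ∀ x, sub.contains x = true → pvBack rev sub x
  | step : ∀ x p, sub.contains p = false → p ∈ rev.getD x [] → pvBack rev sub x →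
      pvBack rev sub p

theorem pvDfs_of_RS (graph : List (Int × List Int)) (sub : PySem.Set Int)
    (V : PySem.Set Int) (x : Int) (h : pvRS graph sub V x) : pvDfs graph sub x V = true := by
  induction h with
  | hit V x h1 h2 =>
    have h1' : x ∉ V := by simpa using h1
    have h2' : x ∈ sub := by simpa using h2
    rw [pvDfs]
    simp [PySem.Set.contains, h1', h2']
  | step V x y h1 h2 h3 h4 ih =>
    have h1' : x ∉ V := by simpa using h1
    have h2' : x ∉ sub := by simpa using h2
    rw [pvDfs]
    simp only [PySem.Set.contains, List.contains_iff_mem, h1', h2']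
    simp only [if_false]
    refine List.any_eq_true.mpr ⟨⟨y, h3⟩, List.mem_attach _ _, ?_⟩
    exact ih

theorem pvRS_of_dfs (graph : List (Int × List Int)) (sub : PySem.Set Int)
    (x : Int) (V : PySem.Set Int) (h : pvDfs graph sub x V = true) : pvRS graph sub V x := by
  fun_induction pvDfs graph sub x V with
  | case1 node visited hv => cases h
  | case2 node visited hv hs => exact pvRS.hit _ _ (by simpa [PySem.Set.contains] using hv) hs
  | case3 node visited hv hs ih =>
    obtain ⟨⟨y, hy⟩, -, hrec⟩ := List.any_eq_true.mp h
    exact pvRS.step _ _ y (by simpa [PySem.Set.contains] using hv)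
      (by simpa using hs) hy (ih ⟨y, hy⟩ hrec)

theorem pvReach_of_RS (graph : List (Int × List Int)) (sub : PySem.Set Int)
    (V : PySem.Set Int) (x : Int) (h : pvRS graph sub V x) : pvReach graph sub x := by
  induction h with
  | hit V x h1 h2 => exact pvReach.hit x h2
  | step V x y h1 h2 h3 h4 ih => exact pvReach.step x y h3 ih

theorem pvChain_of_reach (graph : List (Int × List Int)) (sub : PySem.Set Int) (x : Int)
    (h : pvReach graph sub x) : ∃ l, pvChain graph sub x l := by
  induction h with
  | hit x hx => exact ⟨[], hx⟩
  | step x y hxy hy ih =>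
    obtain ⟨l, hl⟩ := ih
    cases hb : sub.contains x with
    | true => exact ⟨[], hb⟩
    | false => exact ⟨y :: l, hb, hxy, hl⟩

theorem pvChain_suffix (graph : List (Int × List Int)) (sub : PySem.Set Int) :
    ∀ (l1 : List Int) (x z : Int) (l2 : List Int), pvChain graph sub x (l1 ++ z :: l2) →
      pvChain graph sub z l2 := by
  intro l1
  induction l1 with
  | nil => intro x z l2 h; exact h.2.2
  | cons a l1 ih => intro x z l2 h; exact ih a z l2 h.2.2

theorem pvChain_nodup (graph : List (Int × List Int)) (sub : PySem.Set Int) :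
    ∀ (n : Nat) (x : Int) (l : List Int), l.length ≤ n → pvChain graph sub x l →
      ∃ l', l' ⊆ l ∧ pvChain graph sub x l' ∧ (x :: l').Nodup := by
  intro n
  induction n with
  | zero =>
    intro x l hl h
    have : l = [] := List.eq_nil_of_length_eq_zero (Nat.le_zero.mp hl)
    subst this
    exact ⟨[], by simp, h, List.nodup_singleton x⟩
  | succ n ih =>
    intro x l hl h
    by_cases hx : x ∈ l
    · obtain ⟨l1, l2, rfl⟩ := List.append_of_mem hx
      have h2 := pvChain_suffix graph sub l1 x x l2 h
      have hlen : l2.length ≤ n := by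
        have hl' := hl
        simp [List.length_append] at hl'
        omega
      obtain ⟨l', hsub, hch, hnd⟩ := ih x l2 hlen h2
      exact ⟨l', fun a ha => by simp [hsub ha], hch, hnd⟩
    · cases l with
      | nil => exact ⟨[], by simp, h, List.nodup_singleton x⟩
      | cons y l' =>
        obtain ⟨hxs, hxy, hch'⟩ := h
        obtain ⟨l'', hsub', hch'', hnd'⟩ := ih y l' (by simp at hl; omega) hch'
        refine ⟨y :: l'', ?_, ⟨hxs, hxy, hch''⟩, ?_⟩
        · intro a ha
          rcases List.mem_cons.mp ha with rfl | ha'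
          · simp
          · simp [hsub' ha']
        · refine List.nodup_cons.mpr ⟨?_, hnd'⟩
          intro hmem
          apply hx
          rcases List.mem_cons.mp hmem with rfl | hx'
          · simp
          · simp [hsub' hx']

theorem pvRS_of_chain (graph : List (Int × List Int)) (sub : PySem.Set Int) :
    ∀ (l : List Int) (x : Int), pvChain graph sub x l → (x :: l).Nodup →
      ∀ V : PySem.Set Int, (∀ a ∈ x :: l, PySem.Set.contains V a = false) →
        pvRS graph sub V x := by
  intro l
  induction l with
  | nil =>
    intro x h hnd V hV
    exact pvRS.hit V x (hV x (by simp)) h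
  | cons y l ih =>
    intro x h hnd V hV
    obtain ⟨hxs, hxy, hch⟩ := h
    refine pvRS.step V x y (hV x (by simp)) hxs hxy ?_
    refine ih y hch (List.Nodup.of_cons hnd) _ ?_
    intro a ha
    have hax : a ≠ x := by
      rintro rfl
      exact (List.nodup_cons.mp hnd).1 ha
    cases hc : PySem.Set.contains (PySem.Set.add V x) a with
    | false => rfl
    | true =>
      have hmm : a ∈ PySem.Set.add V x := by simpa [PySem.Set.contains] using hc
      rcases (PySem.Set.mem_add V x a).mp hmm with hmem | rfl
      · have hfa := hV a (by simp [ha])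
        simp [PySem.Set.contains, hmem] at hfa
      · exact absurd rfl hax

theorem pvDfs_empty_iff_reach (graph : List (Int × List Int)) (sub : PySem.Set Int) (x : Int) :
    pvDfs graph sub x PySem.Set.empty = true ↔ pvReach graph sub x := by
  constructor
  · intro h
    exact pvReach_of_RS graph sub _ x (pvRS_of_dfs graph sub x _ h)
  · intro h
    obtain ⟨l, hl⟩ := pvChain_of_reach graph sub x h
    obtain ⟨l', _, hch, hnd⟩ := pvChain_nodup graph sub l.length x l le_rfl hl
    exact pvDfs_of_RS graph sub _ x
      (pvRS_of_chain graph sub l' x hch hnd PySem.Set.empty (fun a _ => rfl))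

theorem pv_mem_rev (graph : List (Int × List Int)) (q p : Int) :
    p ∈ (pvRev graph).getD q [] ↔ ∃ ns, (p, ns) ∈ graph ∧ q ∈ ns := by
  have key : ∀ (g : List (Int × List Int)) (d : PySem.Dict Int (List Int)),
      p ∈ (g.foldl (fun d p => p.2.foldl (fun d v => PySem.Dict.modify d v [] (· ++ [p.1])) d) d).getD q []
        ↔ p ∈ d.getD q [] ∨ ∃ ns, (p, ns) ∈ g ∧ q ∈ ns := by
    intro g
    induction g with
    | nil => simp
    | cons hd g ih =>
      intro d
      simp only [List.foldl_cons]
      rw [ih]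
      have hinner : (hd.2.foldl (fun d v => PySem.Dict.modify d v [] (· ++ [hd.1])) d).getD q []
          = d.getD q [] ++ ((hd.2.map (fun v => (v, hd.1))).filter (·.1 == q)).map (·.2) := by
        rw [← List.foldl_map (f := fun v => (v, hd.1))
          (g := fun d (p : Int × Int) => PySem.Dict.modify d p.1 [] (· ++ [p.2]))]
        exact PySem.Dict.getD_foldl_modify_append _ d q
      rw [hinner]
      have hm2 : ∀ u : Int, u ∈ ((hd.2.map (fun v => (v, hd.1))).filter (·.1 == q)).map (·.2)
          ↔ (u = hd.1 ∧ q ∈ hd.2) := by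
        intro u
        simp [List.mem_filter]
        aesop
      simp only [List.mem_append, hm2, List.mem_cons]
      constructor
      · rintro ((hp | ⟨rfl, hq⟩) | ⟨ns, hns, hq⟩)
        · exact Or.inl hp
        · exact Or.inr ⟨hd.2, Or.inl (by cases hd; rfl), hq⟩
        · exact Or.inr ⟨ns, Or.inr hns, hq⟩
      · rintro (hp | ⟨ns, (heq | hns), hq⟩)
        · exact Or.inl (Or.inl hp)
        · have h1 : hd.1 = p := by rw [← heq]
          have h2 : q ∈ hd.2 := by rw [← heq]; exact hq
          exact Or.inl (Or.inr ⟨h1.symm, h2⟩)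
        · exact Or.inr ⟨ns, hns, hq⟩
  have h0 : p ∈ (PySem.Dict.empty : PySem.Dict Int (List Int)).getD q [] ↔ False := by
    simp [PySem.Dict.getD_empty]
  rw [pvRev, key graph PySem.Dict.empty]
  rw [h0.eq]
  simp

theorem pvAdj_mem_iff (graph : List (Int × List Int))
    (hpre : (graph.map Prod.fst).Nodup) (p q : Int) :
    q ∈ pvAdj graph p ↔ ∃ ns, (p, ns) ∈ graph ∧ q ∈ ns := by
  have hnod : (⟨graph⟩ : PySem.Dict Int (List Int)).keys.Nodup := by
    simpa [PySem.Dict.keys, PySem.Dict.items] using hpre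
  unfold pvAdj
  rw [PySem.Dict.getD_eq_get?_getD]
  constructor
  · intro hq
    cases hg : PySem.Dict.get? (⟨graph⟩ : PySem.Dict Int (List Int)) p with
    | none => rw [hg] at hq; simp at hq
    | some ns =>
      rw [hg] at hq
      have := (PySem.Dict.get?_eq_some_iff_mem_items (⟨graph⟩ : PySem.Dict Int (List Int)) p ns hnod).mp hg
      exact ⟨ns, this, hq⟩
  · rintro ⟨ns, hmem, hq⟩
    have : PySem.Dict.get? (⟨graph⟩ : PySem.Dict Int (List Int)) p = some ns :=
      (PySem.Dict.get?_eq_some_iff_mem_items _ p ns hnod).mpr hmem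
    rw [this]
    exact hq

theorem pvReach_of_back (graph : List (Int × List Int)) (sub : PySem.Set Int)
    (hpre : (graph.map Prod.fst).Nodup) (p : Int)
    (h : pvBack (pvRev graph) sub p) : pvReach graph sub p := by
  induction h with
  | root x hx => exact pvReach.hit x hx
  | step x p hsp hpr hbx ih =>
    obtain ⟨ns, hmem, hx⟩ := (pv_mem_rev graph x p).mp hpr
    exact pvReach.step p x ((pvAdj_mem_iff graph hpre p x).mpr ⟨ns, hmem, hx⟩) ih

theorem pvBack_of_reach (graph : List (Int × List Int)) (sub : PySem.Set Int)
    (hpre : (graph.map Prod.fst).Nodup) (p : Int)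
    (h : pvReach graph sub p) : pvBack (pvRev graph) sub p := by
  induction h with
  | hit x hx => exact pvBack.root x hx
  | step x y hxy hy ih =>
    cases hb : sub.contains x with
    | true => exact pvBack.root x hb
    | false =>
      obtain ⟨ns, hmem, hyns⟩ := (pvAdj_mem_iff graph hpre x y).mp hxy
      exact pvBack.step y x hb ((pv_mem_rev graph y x).mpr ⟨ns, hmem, hyns⟩) ih

theorem pvScan_reach_subset (sub : PySem.Set Int) :
    ∀ (ps : List Int) (acc : PySem.Set Int × List Int) (z : Int),
      z ∈ acc.1 → z ∈ (pvScan sub ps acc).1 := by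
  intro ps
  induction ps with
  | nil => intro acc z h; simpa [pvScan] using h
  | cons p ps ih =>
    intro acc z h
    simp only [pvScan, List.foldl_cons] at *
    split_ifs with hc
    · exact ih _ z ((PySem.Set.mem_add acc.1 p z).mpr (Or.inl h))
    · exact ih _ z h

theorem pvScan_stack_subset (sub : PySem.Set Int) :
    ∀ (ps : List Int) (acc : PySem.Set Int × List Int) (z : Int),
      z ∈ acc.2 → z ∈ (pvScan sub ps acc).2 := by
  intro ps
  induction ps with
  | nil => intro acc z h; simpa [pvScan] using h
  | cons p ps ih =>
    intro acc z h
    simp only [pvScan, List.foldl_cons] at *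
    split_ifs with hc
    · exact ih _ z (by simp [h])
    · exact ih _ z h

theorem pvScan_mem_reach (sub : PySem.Set Int) :
    ∀ (ps : List Int) (acc : PySem.Set Int × List Int) (z : Int),
      z ∈ (pvScan sub ps acc).1 → z ∈ acc.1 ∨ (z ∈ ps ∧ sub.contains z = false) := by
  intro ps
  induction ps with
  | nil => intro acc z h; simp only [pvScan, List.foldl_nil] at h; exact Or.inl h
  | cons p ps ih =>
    intro acc z h
    simp only [pvScan, List.foldl_cons] at h
    split_ifs at h with hc
    · rcases ih _ z h with hz | ⟨hzps, hzs⟩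
      · rcases (PySem.Set.mem_add acc.1 p z).mp hz with hz' | rfl
        · exact Or.inl hz'
        · have : sub.contains z = false := by
            simp only [Bool.and_eq_true, Bool.not_eq_true'] at hc
            exact hc.1
          exact Or.inr ⟨by simp, this⟩
      · exact Or.inr ⟨by simp [hzps], hzs⟩
    · rcases ih _ z h with hz | ⟨hzps, hzs⟩
      · exact Or.inl hz
      · exact Or.inr ⟨by simp [hzps], hzs⟩

theorem pvScan_mem_stack (sub : PySem.Set Int) :
    ∀ (ps : List Int) (acc : PySem.Set Int × List Int) (z : Int),
      z ∈ (pvScan sub ps acc).2 → z ∈ acc.2 ∨ (z ∈ ps ∧ sub.contains z = false) := by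
  intro ps
  induction ps with
  | nil => intro acc z h; simp only [pvScan, List.foldl_nil] at h; exact Or.inl h
  | cons p ps ih =>
    intro acc z h
    simp only [pvScan, List.foldl_cons] at h
    split_ifs at h with hc
    · rcases ih _ z h with hz | ⟨hzps, hzs⟩
      · rcases List.mem_cons.mp hz with rfl | hz'
        · have : sub.contains z = false := by
            simp only [Bool.and_eq_true, Bool.not_eq_true'] at hc
            exact hc.1
          exact Or.inr ⟨by simp, this⟩
        · exact Or.inl hz'
      · exact Or.inr ⟨by simp [hzps], hzs⟩
    · rcases ih _ z h with hz | ⟨hzps, hzs⟩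
      · exact Or.inl hz
      · exact Or.inr ⟨by simp [hzps], hzs⟩

theorem pvScan_covers (sub : PySem.Set Int) :
    ∀ (ps : List Int) (acc : PySem.Set Int × List Int) (p : Int),
      p ∈ ps → sub.contains p = false → p ∈ (pvScan sub ps acc).1 := by
  intro ps
  induction ps with
  | nil => intro acc p h hs; cases h
  | cons a ps ih =>
    intro acc p h hs
    simp only [pvScan, List.foldl_cons]
    rcases List.mem_cons.mp h with rfl | hmem
    · by_cases hc : (!sub.contains p && !PySem.Set.contains acc.1 p) = true
      · rw [if_pos hc]
        exact pvScan_reach_subset sub ps _ p ((PySem.Set.mem_add acc.1 p p).mpr (Or.inr rfl))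
      · rw [if_neg hc]
        have : PySem.Set.contains acc.1 p = true := by
          simp only [Bool.and_eq_true, Bool.not_eq_true'] at hc
          rcases Bool.eq_false_or_eq_true (PySem.Set.contains acc.1 p) with h0 | h0
          · exact h0
          · exact absurd ⟨hs, h0⟩ hc
        exact pvScan_reach_subset sub ps _ p (by simpa [PySem.Set.contains] using this)
    · split_ifs <;> exact ih _ p hmem hs

theorem pvScan_new_in_stack (sub : PySem.Set Int) :
    ∀ (ps : List Int) (acc : PySem.Set Int × List Int) (z : Int),
      z ∈ (pvScan sub ps acc).1 → z ∈ acc.1 ∨ z ∈ (pvScan sub ps acc).2 := by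
  intro ps
  induction ps with
  | nil => intro acc z h; simp only [pvScan, List.foldl_nil] at h; exact Or.inl h
  | cons p ps ih =>
    intro acc z h
    simp only [pvScan, List.foldl_cons] at h ⊢
    split_ifs at h ⊢ with hc
    · rcases ih _ z h with hz | hz
      · rcases (PySem.Set.mem_add acc.1 p z).mp hz with hz' | rfl
        · exact Or.inl hz'
        · exact Or.inr (pvScan_stack_subset sub ps _ z (by simp))
      · exact Or.inr hz
    · exact ih _ z h

theorem pvBfs_sound (rev : PySem.Dict Int (List Int)) (sub : PySem.Set Int) :
    ∀ (stack : List Int) (reach : PySem.Set Int),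
      (∀ x ∈ stack, pvBack rev sub x) →
      (∀ z ∈ reach, sub.contains z = false ∧ pvBack rev sub z) →
      ∀ z ∈ pvBfs rev sub stack reach, sub.contains z = false ∧ pvBack rev sub z := by
  intro stack reach
  fun_induction pvBfs rev sub stack reach with
  | case1 reach =>
    intro h1 h2 z hz
    exact h2 z hz
  | case2 x stack reach rs ih =>
    intro h1 h2 z hz
    refine ih ?_ ?_ z hz
    · -- new stack elements
      intro a ha
      rcases pvScan_mem_stack sub (rev.getD x []) (reach, stack) a ha with ha' | ⟨hap, has⟩
      · exact h1 a (by simp [ha'])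
      · exact pvBack.step x a has hap (h1 x (by simp))
    · -- new reach elements
      intro a ha
      rcases pvScan_mem_reach sub (rev.getD x []) (reach, stack) a ha with ha' | ⟨hap, has⟩
      · exact h2 a ha'
      · exact ⟨has, pvBack.step x a has hap (h1 x (by simp))⟩

theorem pvBfs_closed (rev : PySem.Dict Int (List Int)) (sub : PySem.Set Int) :
    ∀ (stack : List Int) (reach : PySem.Set Int),
      (∀ x ∈ stack, sub.contains x = true ∨ x ∈ reach) →
      (∀ q, (sub.contains q = true ∨ q ∈ reach) → q ∉ stack →
        ∀ p ∈ rev.getD q [], sub.contains p = false → p ∈ reach) →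
      ∀ q, (sub.contains q = true ∨ q ∈ pvBfs rev sub stack reach) →
        ∀ p ∈ rev.getD q [], sub.contains p = false → p ∈ pvBfs rev sub stack reach := by
  intro stack reach
  fun_induction pvBfs rev sub stack reach with
  | case1 reach =>
    intro h1 h2 q hq p hp hps
    exact h2 q hq (by simp) p hp hps
  | case2 x stack reach rs ih =>
    intro h1 h2 q hq p hp hps
    refine ih ?_ ?_ q hq p hp hps
    · -- stack invariant
      intro a ha
      rcases pvScan_mem_stack sub (rev.getD x []) (reach, stack) a ha with ha' | ⟨hap, has⟩
      · rcases h1 a (by simp [ha']) with h | h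
        · exact Or.inl h
        · exact Or.inr (pvScan_reach_subset sub (rev.getD x []) (reach, stack) a h)
      · exact Or.inr (pvScan_covers sub (rev.getD x []) (reach, stack) a hap has)
    · -- closure invariant
      intro b hb hbs c hc hcs
      by_cases hbx : b = x
      · subst hbx
        exact pvScan_covers sub (rev.getD b []) (reach, stack) c hc hcs
      · have hbr : sub.contains b = true ∨ b ∈ reach := by
          rcases hb with h | h
          · exact Or.inl h
          · rcases pvScan_new_in_stack sub (rev.getD x []) (reach, stack) b h with h' | h'
            · exact Or.inr h'
            · exact absurd h' hbs
        have hbnost : b ∉ stack := by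
          intro hmem
          exact hbs (pvScan_stack_subset sub (rev.getD x []) (reach, stack) b hmem)
        have := h2 b hbr (by simp [hbnost, hbx]) c hc hcs
        exact pvScan_reach_subset sub (rev.getD x []) (reach, stack) c this

theorem pvBack_mem_of_closed (rev : PySem.Dict Int (List Int)) (sub : PySem.Set Int)
    (R : PySem.Set Int)
    (h : ∀ q, (sub.contains q = true ∨ q ∈ R) → ∀ p ∈ rev.getD q [],
      sub.contains p = false → p ∈ R) :
    ∀ p, pvBack rev sub p → sub.contains p = false → p ∈ R := by
  intro p hb
  induction hb with
  | root x hx => intro hfx; rw [hx] at hfx; cases hfx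
  | step x p hsp hpr hbx ih =>
    intro _
    cases hsx : sub.contains x with
    | true => exact h x (Or.inl hsx) p hpr hsp
    | false => exact h x (Or.inr (ih hsx)) p hpr hsp

-- ===== VERDICT (by name: the statement is the Claim_ definition above) =====
theorem is_subgraph_output_returning_spec : Claim_equal_is_subgraph_output_returning := by
  intro graph subgraph_nodes _hdom hpre
  replace hpre : (graph.map Prod.fst).Nodup := hpre
  unfold Spec_is_subgraph_output_returning
  simp only [is_subgraph_output_returning, is_subgraph_output_returning_alt]
  apply PySem.List.any_congr_mem
  intro u _hu
  apply PySem.List.any_congr_mem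
  intro v _hv
  cases hs : PySem.Set.contains (PySem.Set.ofList subgraph_nodes) v with
  | true => simp
  | false =>
    simp only [Bool.not_false, Bool.true_and]
    set sub := PySem.Set.ofList subgraph_nodes with hsubdef
    set rev := pvRev graph with hrevdef
    set R := pvBfs rev sub subgraph_nodes PySem.Set.empty with hRdef
    have hseed : ∀ x ∈ subgraph_nodes, sub.contains x = true := by
      intro x hx
      exact (PySem.Set.contains_iff sub x).mpr ((PySem.Set.mem_ofList subgraph_nodes x).mpr hx)
    have hcl : ∀ q, (sub.contains q = true ∨ q ∈ R) → ∀ p ∈ rev.getD q [],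
        sub.contains p = false → p ∈ R := by
      apply pvBfs_closed rev sub subgraph_nodes PySem.Set.empty
      · intro x hx
        exact Or.inl (hseed x hx)
      · intro q hq hqs p hp hps
        rcases hq with hq | hq
        · exact absurd ((PySem.Set.mem_ofList subgraph_nodes q).mp
            ((PySem.Set.contains_iff sub q).mp hq)) hqs
        · cases hq
    have hsound : ∀ z ∈ R, sub.contains z = false ∧ pvBack rev sub z := by
      apply pvBfs_sound rev sub subgraph_nodes PySem.Set.empty
      · intro x hx
        exact pvBack.root x (hseed x hx)
      · intro z hz
        cases hz
    rw [Bool.eq_iff_iff]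
    constructor
    · intro hdfs
      have hreach := (pvDfs_empty_iff_reach graph sub v).mp hdfs
      have hback := pvBack_of_reach graph sub hpre v hreach
      have hmem : v ∈ R := pvBack_mem_of_closed rev sub R hcl v hback hs
      exact (PySem.Set.contains_iff R v).mpr hmem
    · intro hR
      have hmem : v ∈ R := (PySem.Set.contains_iff R v).mp hR
      have hback := (hsound v hmem).2
      have hreach := pvReach_of_back graph sub hpre v hback
      exact (pvDfs_empty_iff_reach graph sub v).mpr hreach
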